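-- pv_equiv track=rewrite | github.com/FrancescoMezzacasa/Universita | Programmazione/Ripetizioni/Stringhe_Funzioni/Es15.py | sort_case
-- ===== SOURCE A (Python) =====
-- def sort_case(text):
--     '''
--     (str) -> str
--
--     >>> sort_case('PlYoTHOveN')
--     'lovePYTHON'
--     >>> sort_case('PYTHONlove')
--     'lovePYTHON'
--     '''
--     nuova = ''
--
--     for i in text:
--         if(i.islower()):#se è minuscolo lo aggiungi alla nuova
--             nuova += i
--
--     for i in text:
--         if(i.isupper()):#se è maiuscolo lo aggiungi alla nuova
--             nuova += i
--
--     return nuova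
-- ===== SOURCE B (Python) =====
-- def sort_case(text):
--     letters = [c for c in text if c.islower() or c.isupper()]
--     return ''.join(sorted(letters, key=str.isupper))
-- ===== Notes on version B (the rewrite author's own statement) =====
-- stated objective: idiomatic
-- what changed: Replaces A's two separate filtering passes (lowercase pass then uppercase pass, building the string by repeated concatenation) with a single filter of the cased characters followed by one stable sort keyed on isupper, whose stability keeps lowercase before uppercase and preserves original order within each group.
import Mathlib
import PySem

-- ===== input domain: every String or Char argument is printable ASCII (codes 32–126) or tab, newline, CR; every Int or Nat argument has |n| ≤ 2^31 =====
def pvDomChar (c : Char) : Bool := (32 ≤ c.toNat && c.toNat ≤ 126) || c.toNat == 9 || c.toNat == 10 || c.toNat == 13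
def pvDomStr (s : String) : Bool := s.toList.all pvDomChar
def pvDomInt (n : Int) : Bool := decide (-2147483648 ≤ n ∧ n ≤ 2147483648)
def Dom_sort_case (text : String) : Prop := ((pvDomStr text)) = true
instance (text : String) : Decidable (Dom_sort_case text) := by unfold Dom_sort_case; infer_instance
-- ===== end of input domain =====

-- B replaces A's two filtering passes by one filter plus a stable sort keyed on isupper (idiomatic rewrite).

-- ===== PORT A =====
-- two passes over text appending lowercase then uppercase chars (string concatenation as List Char accumulator)
def sort_case (text : String) : String :=
  let nuova : List Char :=
    text.toList.foldl (fun acc c => if PySem.Chars.islower c then acc ++ [c] else acc) []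
  let nuova :=
    text.toList.foldl (fun acc c => if PySem.Chars.isupper c then acc ++ [c] else acc) nuova
  String.mk nuova

-- ===== PORT B =====
-- filter the cased characters, then stable-sort by the Bool key isupper; ''.join of chars = String.mk
def sort_case_alt (text : String) : String :=
  let letters := text.toList.filter (fun c => PySem.Chars.islower c || PySem.Chars.isupper c)
  String.mk (PySem.List.sorted letters (fun c => PySem.Chars.isupper c) false)

-- ===== PRECONDITION & SPEC =====
def Spec_sort_case (text : String) (out : String) : Prop := out = sort_case_alt text
instance (text : String) (out : String) : Decidable (Spec_sort_case text out) := by unfold Spec_sort_case; infer_instance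

-- ===== CLAIM (what is proved, stated in full; the proofs are below) =====
def Claim_equal_sort_case : Prop := ∀ (text : String), Dom_sort_case text → Spec_sort_case text (sort_case text)

-- ===== LEMMAS AND PROOFS =====

theorem insertBy_append {α : Type} (before : α → α → Bool) (x : α) (L U : List α)
    (hL : ∀ y ∈ L, before x y = false) :
    PySem.List.insertBy before x (L ++ U) = L ++ PySem.List.insertBy before x U := by
  induction L with
  | nil => simp
  | cons a l ih =>
      have ha : before x a = false := hL a (by simp)
      simp [PySem.List.insertBy, ha, ih (fun y hy => hL y (by simp [hy]))]

theorem insertBy_false_key {α : Type} (key : α → Bool) (x : α) (U : List α)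
    (hx : key x = false) (hU : ∀ y ∈ U, key y = true) :
    PySem.List.insertBy (fun a b => decide (key a < key b)) x U = x :: U := by
  cases U with
  | nil => simp [PySem.List.insertBy]
  | cons u us =>
      have hu : key u = true := hU u (by simp)
      simp [PySem.List.insertBy, hx, hu]

-- the stable-sort invariant: inserting xs into an accumulator that is lowers ++ uppers
theorem foldl_insertBy_split {α : Type} (key : α → Bool) :
    ∀ (xs L U : List α), (∀ y ∈ L, key y = false) → (∀ y ∈ U, key y = true) →
    xs.foldl (fun acc x => PySem.List.insertBy (fun a b => decide (key a < key b)) x acc) (L ++ U)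
      = (L ++ xs.filter (fun c => !key c)) ++ (U ++ xs.filter (fun c => key c)) := by
  intro xs
  induction xs with
  | nil => intro L U _ _; simp
  | cons x xs ih =>
      intro L U hL hU
      by_cases hx : key x = true
      · have hstep : PySem.List.insertBy (fun a b => decide (key a < key b)) x (L ++ U)
            = (L ++ U) ++ [x] := by
          apply PySem.List.insertBy_of_forall_not_before
          intro y _; simp [hx]
        have := ih L (U ++ [x]) hL (by
          intro y hy
          rcases List.mem_append.mp hy with h | h
          · exact hU y h
          · simp at h; simpa [h] using hx)
        simp only [List.foldl_cons, hstep, List.append_assoc] at this ⊢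
        simp [this, hx]
      · have hx' : key x = false := by simpa using hx
        have hstep : PySem.List.insertBy (fun a b => decide (key a < key b)) x (L ++ U)
            = (L ++ [x]) ++ U := by
          rw [insertBy_append _ _ _ _ (fun y hy => by simp [hL y hy])]
          rw [insertBy_false_key key x U hx' hU]
          simp
        have := ih (L ++ [x]) U (by
          intro y hy
          rcases List.mem_append.mp hy with h | h
          · exact hL y h
          · simp at h; simpa [h] using hx') hU
        simp only [List.foldl_cons, hstep, List.append_assoc] at this ⊢
        simpa [hx'] using this

theorem sorted_bool_key {α : Type} (key : α → Bool) (xs : List α) :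
    PySem.List.sorted xs key false = xs.filter (fun c => !key c) ++ xs.filter (fun c => key c) := by
  rw [PySem.List.sorted_eq_foldl_insertBy]
  have := foldl_insertBy_split key xs [] [] (by simp) (by simp)
  simpa using this

theorem lower_not_upper (c : Char) : PySem.Chars.islower c = true → PySem.Chars.isupper c = false := by
  simp only [PySem.Chars.islower, PySem.Chars.isupper, Bool.and_eq_true, decide_eq_true_eq,
    Bool.and_eq_false_iff, decide_eq_false_iff_not, Char.le_def, UInt32.le_iff_toNat_le]
  rintro ⟨h1, h2⟩
  have hv : 'a'.val.toNat = 97 ∧ 'z'.val.toNat = 122 ∧ 'A'.val.toNat = 65 ∧ 'Z'.val.toNat = 90 := by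
    decide
  omega

theorem key_low (c : Char) :
    (!PySem.Chars.isupper c && (PySem.Chars.islower c || PySem.Chars.isupper c)) = PySem.Chars.islower c := by
  have hno := lower_not_upper c
  cases h1 : PySem.Chars.islower c <;> cases h2 : PySem.Chars.isupper c <;> simp_all

theorem key_up (c : Char) :
    (PySem.Chars.isupper c && (PySem.Chars.islower c || PySem.Chars.isupper c)) = PySem.Chars.isupper c := by
  cases h1 : PySem.Chars.islower c <;> cases h2 : PySem.Chars.isupper c <;> simp

-- ===== VERDICT (by name: the statement is the Claim_ definition above) =====
theorem sort_case_spec : Claim_equal_sort_case := by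
  intro text _
  unfold Spec_sort_case sort_case sort_case_alt
  simp only [PySem.List.foldl_append_if (f := fun c => c), List.map_id', List.nil_append]
  rw [sorted_bool_key, List.filter_filter, List.filter_filter]
  simp only [key_low, key_up]
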